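-- pv_equiv track=rewrite | github.com/IyadHad/ProjectPythonFalskPattel | Main.py | Find_file_name
-- ===== SOURCE A (Python) =====
-- alphabet = ['A', 'B', 'C', 'D', 'E', 'F', 'G', 'H', 'I', 'J', 'K', 'L', 'M', 'N', 'O', 'P', 'Q', 'R', 'S', 'T', 'U', 'V', 'W', 'X', 'Y', 'Z']
--
-- def Find_file_name(first_name,last_name):
--     count=1
--     countf1=0
--     countf2=0
--     for i in alphabet:
--         if str.upper(first_name[0]) == i:
--             countf1=count
--         if str.upper(last_name[0]) == i:
--             countf2=count
--         count+=1
--     return f"static/FileCustomer/{str.upper(first_name[0])}{str.upper(last_name[0])}-{len(first_name)+len(last_name)}-{countf1}-{countf2}.txt"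
-- ===== SOURCE B (Python) =====
-- def Find_file_name(first_name, last_name):
--     c1 = first_name[0].upper()
--     c2 = last_name[0].upper()
--     countf1 = ord(c1) - ord('A') + 1 if 'A' <= c1 <= 'Z' else 0
--     countf2 = ord(c2) - ord('A') + 1 if 'A' <= c2 <= 'Z' else 0
--     return f"static/FileCustomer/{c1}{c2}-{len(first_name)+len(last_name)}-{countf1}-{countf2}.txt"
-- ===== Notes on version B (the rewrite author's own statement) =====
-- stated objective: idiomatic
-- what changed: Replaces the 26-iteration scan over the alphabet list with a closed-form position computed from the character code (ord(c)-ord('A')+1, guarded to A-Z), eliminating the loop and the alphabet table.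
import Mathlib
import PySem

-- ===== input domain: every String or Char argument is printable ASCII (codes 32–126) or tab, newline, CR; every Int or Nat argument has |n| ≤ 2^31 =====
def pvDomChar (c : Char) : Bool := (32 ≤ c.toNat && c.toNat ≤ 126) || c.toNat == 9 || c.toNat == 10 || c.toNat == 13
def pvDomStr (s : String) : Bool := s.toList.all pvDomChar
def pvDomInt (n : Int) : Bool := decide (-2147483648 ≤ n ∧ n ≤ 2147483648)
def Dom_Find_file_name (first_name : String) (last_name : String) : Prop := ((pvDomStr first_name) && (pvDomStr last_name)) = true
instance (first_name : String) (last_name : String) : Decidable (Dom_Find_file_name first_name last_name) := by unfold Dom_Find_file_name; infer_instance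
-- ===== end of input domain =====

-- B replaces A's 26-step scan of the alphabet list by a closed-form letter position computed
-- from the character code (idiomatic; no loop, no alphabet table).

-- ===== PORT A =====
-- the module-level constant 'alphabet'
def pvAlphabet : List Char :=
  ['A','B','C','D','E','F','G','H','I','J','K','L','M','N','O','P','Q','R','S','T','U','V','W','X','Y','Z']

def Find_file_name (first_name : String) (last_name : String) : String :=
  -- str.upper(first_name[0]) / str.upper(last_name[0]); Pre_ excludes the IndexError (empty name),
  -- so the getD default is never taken on admitted inputs
  let c1 := PySem.Chars.upperChar ((PySem.Str.pyGet? first_name 0).getD ' ')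
  let c2 := PySem.Chars.upperChar ((PySem.Str.pyGet? last_name 0).getD ' ')
  -- for i in alphabet: ... threading (count, countf1, countf2)
  let s := pvAlphabet.foldl
    (fun (s : Int × Int × Int) i =>
      (s.1 + 1, if c1 = i then s.1 else s.2.1, if c2 = i then s.1 else s.2.2))
    (1, 0, 0)
  "static/FileCustomer/" ++ String.ofList [c1] ++ String.ofList [c2] ++ "-"
    ++ PySem.Int.toStr (PySem.Str.len first_name + PySem.Str.len last_name) ++ "-"
    ++ PySem.Int.toStr s.2.1 ++ "-" ++ PySem.Int.toStr s.2.2 ++ ".txt"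

-- ===== PORT B =====
def Find_file_name_alt (first_name : String) (last_name : String) : String :=
  let c1 := PySem.Chars.upperChar ((PySem.Str.pyGet? first_name 0).getD ' ')
  let c2 := PySem.Chars.upperChar ((PySem.Str.pyGet? last_name 0).getD ' ')
  -- ord(c) - ord('A') + 1 if 'A' <= c <= 'Z' else 0
  let countf1 : Int := if 'A' ≤ c1 ∧ c1 ≤ 'Z' then (c1.toNat : Int) - 65 + 1 else 0
  let countf2 : Int := if 'A' ≤ c2 ∧ c2 ≤ 'Z' then (c2.toNat : Int) - 65 + 1 else 0
  "static/FileCustomer/" ++ String.ofList [c1] ++ String.ofList [c2] ++ "-"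
    ++ PySem.Int.toStr (PySem.Str.len first_name + PySem.Str.len last_name) ++ "-"
    ++ PySem.Int.toStr countf1 ++ "-" ++ PySem.Int.toStr countf2 ++ ".txt"

-- ===== PRECONDITION & SPEC =====
-- Pre_ excludes exactly the inputs where A raises IndexError: an empty first or last name.
def Pre_Find_file_name (first_name : String) (last_name : String) : Prop :=
  first_name ≠ "" ∧ last_name ≠ ""
instance (first_name : String) (last_name : String) : Decidable (Pre_Find_file_name first_name last_name) := by unfold Pre_Find_file_name; infer_instance

def pvWitness_Find_file_name : String × String := ("Ann", "bob")

def Spec_Find_file_name (first_name : String) (last_name : String) (out : String) : Prop := out = Find_file_name_alt first_name last_name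
instance (first_name : String) (last_name : String) (out : String) : Decidable (Spec_Find_file_name first_name last_name out) := by unfold Spec_Find_file_name; infer_instance

-- ===== CLAIM (what is proved, stated in full; the proofs are below) =====
def Claim_equal_Find_file_name : Prop := ∀ (first_name : String) (last_name : String), Dom_Find_file_name first_name last_name → Pre_Find_file_name first_name last_name → Spec_Find_file_name first_name last_name (Find_file_name first_name last_name)

-- ===== LEMMAS AND PROOFS =====

theorem pv_scan_gen (c d : Char) (L : List Char) (hnd : L.Nodup) (k a b : Int) :
    L.foldl (fun (s : Int × Int × Int) i =>
        (s.1 + 1, if c = i then s.1 else s.2.1, if d = i then s.1 else s.2.2)) (k, a, b)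
    = (k + L.length,
       (if c ∈ L then k + L.idxOf c else a),
       (if d ∈ L then k + L.idxOf d else b)) := by
  induction L generalizing k a b with
  | nil => simp
  | cons x L ih =>
    rcases List.nodup_cons.mp hnd with ⟨hx, hL⟩
    simp only [List.foldl_cons, ih hL]
    refine Prod.ext ?_ (Prod.ext ?_ ?_) <;> dsimp only
    · simp only [List.length_cons]; push_cast; ring
    · by_cases hc : c = x
      · subst hc; simp [hx]
      · rw [if_neg hc]
        by_cases hm : c ∈ L
        · rw [if_pos hm, if_pos (List.mem_cons_of_mem _ hm)]
          simp only [List.idxOf_cons, Bool.cond_eq_ite, beq_iff_eq, if_neg (fun h : x = c => hc h.symm)]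
          push_cast; ring
        · rw [if_neg hm, if_neg (by simp [hc, hm])]
    · by_cases hd : d = x
      · subst hd; simp [hx]
      · rw [if_neg hd]
        by_cases hm : d ∈ L
        · rw [if_pos hm, if_pos (List.mem_cons_of_mem _ hm)]
          simp only [List.idxOf_cons, Bool.cond_eq_ite, beq_iff_eq, if_neg (fun h : x = d => hd h.symm)]
          push_cast; ring
        · rw [if_neg hm, if_neg (by simp [hd, hm])]

theorem pv_mem_alpha (c : Char) : c ∈ pvAlphabet ↔ 65 ≤ c.toNat ∧ c.toNat ≤ 90 := by
  constructor
  · intro h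
    fin_cases h <;> decide
  · rintro ⟨h1, h2⟩
    interval_cases hn : c.toNat <;>
      (rw [← Char.ofNat_toNat c, hn]; decide)

theorem pv_idx_alpha (c : Char) (h : c ∈ pvAlphabet) :
    (pvAlphabet.idxOf c : Int) = (c.toNat : Int) - 65 := by
  fin_cases h <;> decide

theorem pv_le_iff (a b : Char) : a ≤ b ↔ a.toNat ≤ b.toNat := by
  rw [Char.le_def]
  exact ⟨fun h => by exact_mod_cast h, fun h => by exact_mod_cast h⟩

theorem pv_scan_fst (c d : Char) :
    (pvAlphabet.foldl
      (fun (s : Int × Int × Int) i =>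
        (s.1 + 1, if c = i then s.1 else s.2.1, if d = i then s.1 else s.2.2))
      (1, 0, 0)).2.1
    = (if 'A' ≤ c ∧ c ≤ 'Z' then (c.toNat : Int) - 65 + 1 else 0) := by
  rw [pv_scan_gen c d pvAlphabet (by decide) 1 0 0]
  dsimp only
  by_cases h : c ∈ pvAlphabet
  · rw [if_pos h, pv_idx_alpha c h, if_pos]
    · ring
    · rcases (pv_mem_alpha c).mp h with ⟨h1, h2⟩
      constructor <;> rw [pv_le_iff] <;> simpa using ‹_›
  · rw [if_neg h, if_neg]
    rintro ⟨h1, h2⟩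
    rw [pv_le_iff] at h1 h2
    exact h ((pv_mem_alpha c).mpr ⟨by simpa using h1, by simpa using h2⟩)

theorem pv_scan_snd (c d : Char) :
    (pvAlphabet.foldl
      (fun (s : Int × Int × Int) i =>
        (s.1 + 1, if c = i then s.1 else s.2.1, if d = i then s.1 else s.2.2))
      (1, 0, 0)).2.2
    = (if 'A' ≤ d ∧ d ≤ 'Z' then (d.toNat : Int) - 65 + 1 else 0) := by
  rw [pv_scan_gen c d pvAlphabet (by decide) 1 0 0]
  dsimp only
  by_cases h : d ∈ pvAlphabet
  · rw [if_pos h, pv_idx_alpha d h, if_pos]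
    · ring
    · rcases (pv_mem_alpha d).mp h with ⟨h1, h2⟩
      constructor <;> rw [pv_le_iff] <;> simpa using ‹_›
  · rw [if_neg h, if_neg]
    rintro ⟨h1, h2⟩
    rw [pv_le_iff] at h1 h2
    exact h ((pv_mem_alpha d).mpr ⟨by simpa using h1, by simpa using h2⟩)

-- ===== VERDICT (by name: the statement is the Claim_ definition above) =====
theorem Find_file_name_spec : Claim_equal_Find_file_name := by
  intro first_name last_name _ _
  unfold Spec_Find_file_name
  simp only [Find_file_name, Find_file_name_alt, pv_scan_fst, pv_scan_snd]
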